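-- pv_equiv track=rewrite | github.com/dbuchacher/is | speak/app/render.py | render_coord_index
-- ===== SOURCE A (Python) =====
-- HTML_TEMPLATE = """<!DOCTYPE html>
-- <html lang="en">
-- <head>
-- <meta charset="utf-8">
-- <meta name="viewport" content="width=device-width, initial-scale=1">
-- <title>speak — {word}</title>
-- <style>
--   body {{ font-family: -apple-system, system-ui, sans-serif;
--           max-width: 42em; margin: 2em auto; padding: 0 1em;
--           line-height: 1.5; color: #222; background: #fafaf7; }}
--   .word {{ font-size: 2em; font-weight: bold; }}
--   .morphemes {{ font-family: ui-monospace, monospace;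
--                  font-size: 1.2em; color: #555; margin-top: 0.5em; }}
--   .stress {{ text-decoration: underline;
--               text-decoration-color: #c53030;
--               text-decoration-thickness: 3px; color: #222; }}
--   .pie-form {{ color: #2c5282; font-family: ui-monospace, monospace;
--                margin-top: 0.5em; }}
--   .pie-gloss {{ color: #666; font-style: italic; }}
--   .section {{ margin-top: 1.5em; }}
--   .branch-label {{ font-weight: bold; margin-right: 0.3em; }}
--   .claim {{ border-left: 3px solid #c53030; padding: 0.5em 1em;
--              background: #fff5f5; }}
--   table {{ margin-top: 0.5em; border-collapse: collapse; }}
--   td {{ padding: 0.2em 1em 0.2em 0; vertical-align: top; }}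
--   .lang {{ color: #666; font-weight: bold; }}
--   .ids {{ font-family: ui-monospace, monospace; color: #2c5282; }}
--   .gloss {{ color: #666; font-style: italic; }}
--   .synthesis {{ margin-top: 1em; color: #444; font-style: italic; }}
--   .try-next {{ margin-top: 2em; color: #666; font-size: 0.9em; }}
--   .try-next a {{ color: #2c5282; font-family: ui-monospace, monospace;
--                   margin-right: 1em; }}
--   .no-parallel {{ color: #999; }}
--   footer {{ margin-top: 4em; color: #999; font-size: 0.85em;
--              border-top: 1px solid #eee; padding-top: 1em; }}
--   a {{ color: #2c5282; }}
-- </style>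
-- </head>
-- <body>
-- {body}
-- <footer>
-- <p>one universe, many vocabularies. <a href="index.html">speak</a> shows
-- the substrate decomposition behind an English word.</p>
-- </footer>
-- </body>
-- </html>
-- """
--
-- def render_coord_index(coords):
--     """Index of all coord pages, grouped by hit count.
--
--     coords: list of (name, coord_data, hit_count) tuples.
--     """
--     fours = [(n, c) for n, c, h in coords if h == 4]
--     threes = [(n, c) for n, c, h in coords if h == 3]
--     twos = [(n, c) for n, c, h in coords if h == 2]
--
--     body = ['<h1>coord pages</h1>',
--             '<p>Each coord is a substrate identity named by multiple '
--             'unrelated vocabularies. The shared claim lives here, once; '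
--             'the English descendants are apertures on it.</p>']
--
--     if fours:
--         body.append(f'<h2 style="margin-top:2em;">four-way convergence '
--                     f'({len(fours)})</h2><ul>')
--         for name, c in fours:
--             body.append(f'<li><a href="{name}.html">{name}</a> '
--                         f'<span style="color:#888;">— {c.get("claim", "")[:80]}'
--                         f'{"..." if len(c.get("claim", "")) > 80 else ""}'
--                         f'</span></li>')
--         body.append('</ul>')
--
--     if threes:
--         body.append(f'<h2 style="margin-top:2em;">three-way '
--                     f'({len(threes)})</h2><ul>')
--         for name, c in threes:
--             body.append(f'<li><a href="{name}.html">{name}</a> '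
--                         f'<span style="color:#888;">— {c.get("claim", "")[:80]}'
--                         f'{"..." if len(c.get("claim", "")) > 80 else ""}'
--                         f'</span></li>')
--         body.append('</ul>')
--
--     if twos:
--         body.append(f'<h2 style="margin-top:2em;">two-way — below filter '
--                     f'threshold ({len(twos)})</h2>')
--         body.append('<p style="color:#666;font-size:0.9em;">'
--                     'below the 3/4 threshold. Listed here for transparency; '
--                     'not ship-ready as standalone claims.</p><ul>')
--         for name, c in twos:
--             body.append(f'<li><a href="{name}.html">{name}</a></li>')
--         body.append('</ul>')
--
--     body.append('<div class="section" style="margin-top:3em;font-size:0.9em;">'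
--                 '<a href="../index.html">← all words</a></div>')
--
--     return HTML_TEMPLATE.format(word="coords", body="\n".join(body))
-- ===== SOURCE B (Python) =====
-- HTML_TEMPLATE = """<!DOCTYPE html>
-- <html lang="en">
-- <head>
-- <meta charset="utf-8">
-- <meta name="viewport" content="width=device-width, initial-scale=1">
-- <title>speak — {word}</title>
-- <style>
--   body {{ font-family: -apple-system, system-ui, sans-serif;
--           max-width: 42em; margin: 2em auto; padding: 0 1em;
--           line-height: 1.5; color: #222; background: #fafaf7; }}
--   .word {{ font-size: 2em; font-weight: bold; }}
--   .morphemes {{ font-family: ui-monospace, monospace;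
--                  font-size: 1.2em; color: #555; margin-top: 0.5em; }}
--   .stress {{ text-decoration: underline;
--               text-decoration-color: #c53030;
--               text-decoration-thickness: 3px; color: #222; }}
--   .pie-form {{ color: #2c5282; font-family: ui-monospace, monospace;
--                margin-top: 0.5em; }}
--   .pie-gloss {{ color: #666; font-style: italic; }}
--   .section {{ margin-top: 1.5em; }}
--   .branch-label {{ font-weight: bold; margin-right: 0.3em; }}
--   .claim {{ border-left: 3px solid #c53030; padding: 0.5em 1em;
--              background: #fff5f5; }}
--   table {{ margin-top: 0.5em; border-collapse: collapse; }}
--   td {{ padding: 0.2em 1em 0.2em 0; vertical-align: top; }}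
--   .lang {{ color: #666; font-weight: bold; }}
--   .ids {{ font-family: ui-monospace, monospace; color: #2c5282; }}
--   .gloss {{ color: #666; font-style: italic; }}
--   .synthesis {{ margin-top: 1em; color: #444; font-style: italic; }}
--   .try-next {{ margin-top: 2em; color: #666; font-size: 0.9em; }}
--   .try-next a {{ color: #2c5282; font-family: ui-monospace, monospace;
--                   margin-right: 1em; }}
--   .no-parallel {{ color: #999; }}
--   footer {{ margin-top: 4em; color: #999; font-size: 0.85em;
--              border-top: 1px solid #eee; padding-top: 1em; }}
--   a {{ color: #2c5282; }}
-- </style>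
-- </head>
-- <body>
-- {body}
-- <footer>
-- <p>one universe, many vocabularies. <a href="index.html">speak</a> shows
-- the substrate decomposition behind an English word.</p>
-- </footer>
-- </body>
-- </html>
-- """
--
--
-- def _section(h, run):
--     """Render one section for a maximal run of entries sharing hit count h."""
--     out = []
--     if h == 4:
--         out.append('<h2 style="margin-top:2em;">four-way convergence '
--                    '(%d)</h2><ul>' % len(run))
--     elif h == 3:
--         out.append('<h2 style="margin-top:2em;">three-way '
--                    '(%d)</h2><ul>' % len(run))
--     else:
--         out.append('<h2 style="margin-top:2em;">two-way — below filter '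
--                    'threshold (%d)</h2>' % len(run))
--         out.append('<p style="color:#666;font-size:0.9em;">'
--                    'below the 3/4 threshold. Listed here for transparency; '
--                    'not ship-ready as standalone claims.</p><ul>')
--     for _, name, c in run:
--         if h == 2:
--             out.append('<li><a href="%s.html">%s</a></li>' % (name, name))
--         else:
--             claim = c.get("claim", "")
--             out.append('<li><a href="%s.html">%s</a> '
--                        '<span style="color:#888;">— %s%s</span></li>'
--                        % (name, name, claim[:80],
--                           "..." if len(claim) > 80 else ""))
--     out.append('</ul>')
--     return out
--
--
-- def render_coord_index(coords):
--     """Index of all coord pages, grouped by hit count.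
--
--     coords: list of (name, coord_data, hit_count) tuples.
--
--     Sort-then-scan: one ranked list (hit count descending, stable), then a
--     single scan that opens a new section at each run of equal hit counts.
--     """
--     ranked = sorted([(h, n, c) for n, c, h in coords if h in (2, 3, 4)],
--                     key=lambda t: t[0], reverse=True)
--
--     body = ['<h1>coord pages</h1>',
--             '<p>Each coord is a substrate identity named by multiple '
--             'unrelated vocabularies. The shared claim lives here, once; '
--             'the English descendants are apertures on it.</p>']
--
--     i = 0
--     while i < len(ranked):
--         h = ranked[i][0]
--         j = i
--         while j < len(ranked) and ranked[j][0] == h: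
--             j += 1
--         body.extend(_section(h, ranked[i:j]))
--         i = j
--
--     body.append('<div class="section" style="margin-top:3em;font-size:0.9em;">'
--                 '<a href="../index.html">← all words</a></div>')
--
--     return HTML_TEMPLATE.format(word="coords", body="\n".join(body))
-- ===== Notes on version B (the rewrite author's own statement) =====
-- stated objective: alternative
-- what changed: B replaces A's three separate filtering comprehensions and three hard-coded section blocks by sort-then-scan: one stable sort of the eligible entries by hit count descending, then a single run-detection scan that opens a section whenever the hit count changes.
import Mathlib
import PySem

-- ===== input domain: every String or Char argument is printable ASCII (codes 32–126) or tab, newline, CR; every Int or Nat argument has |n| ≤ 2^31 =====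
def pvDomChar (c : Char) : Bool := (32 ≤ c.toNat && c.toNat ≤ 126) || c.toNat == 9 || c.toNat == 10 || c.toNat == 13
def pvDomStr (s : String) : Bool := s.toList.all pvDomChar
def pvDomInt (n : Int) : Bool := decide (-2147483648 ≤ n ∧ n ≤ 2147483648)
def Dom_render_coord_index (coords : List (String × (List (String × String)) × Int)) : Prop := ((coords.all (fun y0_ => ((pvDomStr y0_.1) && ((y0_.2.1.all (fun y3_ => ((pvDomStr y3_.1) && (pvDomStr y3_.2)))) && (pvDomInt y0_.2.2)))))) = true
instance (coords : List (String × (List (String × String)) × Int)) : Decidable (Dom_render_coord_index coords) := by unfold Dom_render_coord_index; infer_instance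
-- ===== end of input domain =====

-- B replaces A's three filtering comprehensions and three hard-coded section blocks by
-- sort-then-scan: one stable sort by hit count descending, then a single run-detection scan
-- that opens a section whenever the hit count changes (objective: alternative algorithm;
-- output is byte-identical).

-- shared literal HTML fragments (the module constant HTML_TEMPLATE and literal strings both Pythons contain)
def pvHtmlPre1 : String := "<!DOCTYPE html>\n<html lang=\"en\">\n<head>\n<meta charset=\"utf-8\">\n<meta name=\"viewport\" content=\"width=device-width, initial-scale=1\">\n<title>speak — "
def pvHtmlPre2 : String := "</title>\n<style>\n  body { font-family: -apple-system, system-ui, sans-serif;\n          max-width: 42em; margin: 2em auto; padding: 0 1em;\n          line-height: 1.5; color: #222; background: #fafaf7; }\n  .word { font-size: 2em; font-weight: bold; }\n  .morphemes { font-family: ui-monospace, monospace;\n                 font-size: 1.2em; color: #555; margin-top: 0.5em; }\n  .stress { text-decoration: underline;\n              text-decoration-color: #c53030;\n              text-decoration-thickness: 3px; color: #222; }\n  .pie-form { color: #2c5282; font-family: ui-monospace, monospace;\n               margin-top: 0.5em; }\n  .pie-gloss { color: #666; font-style: italic; }\n  .section { margin-top: 1.5em; }\n  .branch-label { font-weight: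 bold; margin-right: 0.3em; }\n  .claim { border-left: 3px solid #c53030; padding: 0.5em 1em;\n             background: #fff5f5; }\n  table { margin-top: 0.5em; border-collapse: collapse; }\n  td { padding: 0.2em 1em 0.2em 0; vertical-align: top; }\n  .lang { color: #666; font-weight: bold; }\n  .ids { font-family: ui-monospace, monospace; color: #2c5282; }\n  .gloss { color: #666; font-style: italic; }\n  .synthesis { margin-top: 1em; color: #444; font-style: italic; }\n  .try-next { margin-top: 2em; color: #666; font-size: 0.9em; }\n  .try-next a { color: #2c5282; font-family: ui-monospace, monospace;\n                  margin-right: 1em; }\n  .no-parallel { color: #999; }\n  footer { margin-top: 4em; color: #999; font-size: 0.85em;\n             border-top: 1px solid #eee; padding-top: 1em; }\n  a { color: #2c5282; }\n</style>\n</head>\n<body>\n"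
def pvHtmlPost : String := "\n<footer>\n<p>one universe, many vocabularies. <a href=\"index.html\">speak</a> shows\nthe substrate decomposition behind an English word.</p>\n</footer>\n</body>\n</html>\n"
def pvIntro1 : String := "<h1>coord pages</h1>"
def pvIntroP : String := "<p>Each coord is a substrate identity named by multiple unrelated vocabularies. The shared claim lives here, once; the English descendants are apertures on it.</p>"
def pvHdr4 (k : Int) : String := "<h2 style=\"margin-top:2em;\">four-way convergence (" ++ PySem.Int.toStr k ++ ")</h2><ul>"
def pvHdr3 (k : Int) : String := "<h2 style=\"margin-top:2em;\">three-way (" ++ PySem.Int.toStr k ++ ")</h2><ul>"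
def pvHdr2 (k : Int) : String := "<h2 style=\"margin-top:2em;\">two-way — below filter threshold (" ++ PySem.Int.toStr k ++ ")</h2>"
def pvHdr2b : String := "<p style=\"color:#666;font-size:0.9em;\">below the 3/4 threshold. Listed here for transparency; not ship-ready as standalone claims.</p><ul>"
def pvOutro : String := "<div class=\"section\" style=\"margin-top:3em;font-size:0.9em;\"><a href=\"../index.html\">← all words</a></div>"
def pvLiClaim (name : String) (c : List (String × String)) : String :=
  "<li><a href=\"" ++ name ++ ".html\">" ++ name ++ "</a> <span style=\"color:#888;\">— "
    ++ PySem.Str.slice ((PySem.Dict.mk c).getD "claim" "") none (some 80)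
    ++ (if 80 < PySem.Str.len ((PySem.Dict.mk c).getD "claim" "") then "..." else "")
    ++ "</span></li>"
def pvLiPlain (name : String) : String := "<li><a href=\"" ++ name ++ ".html\">" ++ name ++ "</a></li>"

-- ===== PORT A =====
def render_coord_index (coords : List (String × (List (String × String)) × Int)) : String :=
  let fours := coords.filterMap (fun x => if x.2.2 == 4 then some (x.1, x.2.1) else none)
  let threes := coords.filterMap (fun x => if x.2.2 == 3 then some (x.1, x.2.1) else none)
  let twos := coords.filterMap (fun x => if x.2.2 == 2 then some (x.1, x.2.1) else none)
  let body : List String := [pvIntro1, pvIntroP]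
  let body := if fours = [] then body else
    (fours.foldl (fun b p => b ++ [pvLiClaim p.1 p.2]) (body ++ [pvHdr4 (PySem.List.len fours)])) ++ ["</ul>"]
  let body := if threes = [] then body else
    (threes.foldl (fun b p => b ++ [pvLiClaim p.1 p.2]) (body ++ [pvHdr3 (PySem.List.len threes)])) ++ ["</ul>"]
  let body := if twos = [] then body else
    (twos.foldl (fun b p => b ++ [pvLiPlain p.1])
      (body ++ [pvHdr2 (PySem.List.len twos), pvHdr2b])) ++ ["</ul>"]
  let body := body ++ [pvOutro]
  pvHtmlPre1 ++ "coords" ++ pvHtmlPre2 ++ PySem.Str.join "\n" body ++ pvHtmlPost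

-- ===== PORT B =====
-- _section(h, run): header chosen by h, then the per-entry loop, then '</ul>'
def pvSectionB (h : Int) (run : List (Int × String × List (String × String))) : List String :=
  let out : List String :=
    if h == 4 then [pvHdr4 (PySem.List.len run)]
    else if h == 3 then [pvHdr3 (PySem.List.len run)]
    else [pvHdr2 (PySem.List.len run), pvHdr2b]
  let out := run.foldl (fun o t => o ++ [if h == 2 then pvLiPlain t.2.1 else pvLiClaim t.2.1 t.2.2]) out
  out ++ ["</ul>"]

-- the while-loop scan over the ranked list: each step takes the maximal run ranked[i:j]
-- sharing the current hit count and recurses on the remaining suffix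
def pvScanB : List (Int × String × List (String × String)) → List String
  | [] => []
  | x :: rest =>
      pvSectionB x.1 (x :: rest.takeWhile (fun t => t.1 == x.1))
        ++ pvScanB (rest.dropWhile (fun t => t.1 == x.1))
  termination_by l => l.length
  decreasing_by simp only [List.length_cons]; exact Nat.lt_succ_of_le (List.length_dropWhile_le _ _)

def render_coord_index_alt (coords : List (String × (List (String × String)) × Int)) : String :=
  let ranked := PySem.List.sorted
    (coords.filterMap (fun x => if x.2.2 == 2 || x.2.2 == 3 || x.2.2 == 4 then some (x.2.2, x.1, x.2.1) else none))
    (fun t => t.1) true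
  let body : List String := [pvIntro1, pvIntroP] ++ pvScanB ranked ++ [pvOutro]
  pvHtmlPre1 ++ "coords" ++ pvHtmlPre2 ++ PySem.Str.join "\n" body ++ pvHtmlPost

-- ===== PRECONDITION & SPEC =====
def Spec_render_coord_index (coords : List (String × (List (String × String)) × Int)) (out : String) : Prop := out = render_coord_index_alt coords
instance (coords : List (String × (List (String × String)) × Int)) (out : String) : Decidable (Spec_render_coord_index coords out) := by unfold Spec_render_coord_index; infer_instance

-- ===== CLAIM =====
def Claim_equal_render_coord_index : Prop := ∀ (coords : List (String × (List (String × String)) × Int)), Dom_render_coord_index coords → Spec_render_coord_index coords (render_coord_index coords)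

-- ===== LEMMAS AND PROOFS =====

def pvBefore (a b : Int × String × List (String × String)) : Bool := decide (b.1 < a.1)

theorem pvInsertBy_skip (x : Int × String × List (String × String))
    (l t : List (Int × String × List (String × String)))
    (h : ∀ y ∈ l, ¬ (y.1 < x.1)) :
    PySem.List.insertBy pvBefore x (l ++ t) = l ++ PySem.List.insertBy pvBefore x t := by
  induction l with
  | nil => simp
  | cons y ys ih =>
    have hy := h y (by simp)
    simp only [List.cons_append, PySem.List.insertBy, pvBefore]
    rw [if_neg (by simpa using hy)]
    simp [ih (fun z hz => h z (by simp [hz]))]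

theorem pvInsertBy_front (x : Int × String × List (String × String))
    (l : List (Int × String × List (String × String)))
    (h : ∀ y ∈ l, y.1 < x.1) :
    PySem.List.insertBy pvBefore x l = x :: l := by
  cases l with
  | nil => rfl
  | cons y ys =>
    have hy := h y (by simp)
    simp [PySem.List.insertBy, pvBefore, hy]

-- B's insertion-sort fold keeps the accumulator in the block shape 4s ++ 3s ++ 2s
theorem pvSortFold (xs A B C : List (Int × String × List (String × String)))
    (hA : ∀ p ∈ A, p.1 = 4) (hB : ∀ p ∈ B, p.1 = 3) (hC : ∀ p ∈ C, p.1 = 2)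
    (hxs : ∀ p ∈ xs, p.1 = 2 ∨ p.1 = 3 ∨ p.1 = 4) :
    xs.foldl (fun acc x => PySem.List.insertBy pvBefore x acc) (A ++ B ++ C) =
      (A ++ xs.filter (fun p => p.1 == 4)) ++ (B ++ xs.filter (fun p => p.1 == 3))
        ++ (C ++ xs.filter (fun p => p.1 == 2)) := by
  induction xs generalizing A B C with
  | nil => simp
  | cons x xs ih =>
    have hx := hxs x (by simp)
    have hxs' : ∀ p ∈ xs, p.1 = 2 ∨ p.1 = 3 ∨ p.1 = 4 := fun p hp => hxs p (by simp [hp])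
    rcases hx with h2 | h3 | h4
    · -- x.1 = 2 : skip all three blocks, append at the very end
      have step : PySem.List.insertBy pvBefore x (A ++ B ++ C) = A ++ B ++ (C ++ [x]) := by
        rw [List.append_assoc, pvInsertBy_skip x A (B ++ C)
          (fun y hy => by have := hA y hy; omega)]
        rw [pvInsertBy_skip x B C (fun y hy => by have := hB y hy; omega)]
        rw [show (C : List _) = C ++ [] by simp, pvInsertBy_skip x C []
          (fun y hy => by have := hC y (by simpa using hy); omega)]
        simp [PySem.List.insertBy]
      have hC' : ∀ p ∈ C ++ [x], p.1 = 2 := by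
        intro p hp; rcases List.mem_append.mp hp with h | h
        · exact hC p h
        · simpa using (List.mem_singleton.mp h ▸ h2)
      have := ih A B (C ++ [x]) hA hB hC' hxs'
      simp only [List.foldl_cons, step]
      simp only [List.append_assoc] at this ⊢
      rw [this]
      simp [h2]
    · -- x.1 = 3 : skip A and B, go in front of C
      have step : PySem.List.insertBy pvBefore x (A ++ B ++ C) = A ++ (B ++ [x]) ++ C := by
        rw [List.append_assoc, pvInsertBy_skip x A (B ++ C)
          (fun y hy => by have := hA y hy; omega)]
        rw [pvInsertBy_skip x B C (fun y hy => by have := hB y hy; omega)]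
        rw [pvInsertBy_front x C (fun y hy => by have := hC y hy; omega)]
        simp [List.append_assoc]
      simp only [List.foldl_cons, step]
      have := ih A (B ++ [x]) C hA
        (by intro p hp; rcases List.mem_append.mp hp with h | h
            · exact hB p h
            · simpa using (List.mem_singleton.mp h ▸ h3)) hC hxs'
      rw [this]
      simp [h3, List.append_assoc]
    · -- x.1 = 4 : skip A, go in front of B ++ C
      have step : PySem.List.insertBy pvBefore x (A ++ B ++ C) = (A ++ [x]) ++ B ++ C := by
        rw [List.append_assoc, pvInsertBy_skip x A (B ++ C)
          (fun y hy => by have := hA y hy; omega)]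
        rw [pvInsertBy_front x (B ++ C)
          (fun y hy => by rcases List.mem_append.mp hy with h | h
                          · have := hB y h; omega
                          · have := hC y h; omega)]
        simp [List.append_assoc]
      simp only [List.foldl_cons, step]
      have := ih (A ++ [x]) B C
        (by intro p hp; rcases List.mem_append.mp hp with h | h
            · exact hA p h
            · simpa using (List.mem_singleton.mp h ▸ h4)) hB hC hxs'
      rw [this]
      simp [h4, List.append_assoc]

theorem pvTakeWhile_append_of_all {α : Type} (p : α → Bool) (l r : List α)
    (h : ∀ y ∈ l, p y = true) : (l ++ r).takeWhile p = l ++ r.takeWhile p := by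
  induction l with
  | nil => simp
  | cons y ys ih => simp [h y (by simp), ih (fun z hz => h z (by simp [hz]))]

theorem pvDropWhile_append_of_all {α : Type} (p : α → Bool) (l r : List α)
    (h : ∀ y ∈ l, p y = true) : (l ++ r).dropWhile p = r.dropWhile p := by
  induction l with
  | nil => simp
  | cons y ys ih => simp [h y (by simp), ih (fun z hz => h z (by simp [hz]))]

theorem pvTakeWhile_nil_of_head {α : Type} (p : α → Bool) (r : List α)
    (h : ∀ y ∈ r, p y = false) : r.takeWhile p = [] := by
  cases r with
  | nil => rfl
  | cons y ys => simp [h y (by simp)]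

theorem pvDropWhile_self_of_head {α : Type} (p : α → Bool) (r : List α)
    (h : ∀ y ∈ r, p y = false) : r.dropWhile p = r := by
  cases r with
  | nil => rfl
  | cons y ys => simp [h y (by simp)]

-- the scan emits one section per maximal equal-key block
theorem pvScan_block (k : Int) (l rest : List (Int × String × List (String × String)))
    (hl : ∀ p ∈ l, p.1 = k) (hrest : ∀ p ∈ rest, p.1 ≠ k) :
    pvScanB (l ++ rest) = (if l = [] then [] else pvSectionB k l) ++ pvScanB rest := by
  cases l with
  | nil => simp
  | cons x t =>
    have hx : x.1 = k := hl x (by simp)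
    have ht : ∀ p ∈ t, (p.1 == x.1) = true := fun p hp => by
      simp [hl p (by simp [hp]), hx]
    have hr : ∀ p ∈ rest, (p.1 == x.1) = true → False := fun p hp h => by
      exact hrest p hp (by simpa [hx] using h)
    rw [List.cons_append, pvScanB]
    rw [pvTakeWhile_append_of_all _ t rest ht, pvDropWhile_append_of_all _ t rest ht]
    rw [pvTakeWhile_nil_of_head _ rest (fun y hy => by
      by_contra hc; exact hr y hy (by simpa using hc))]
    rw [pvDropWhile_self_of_head _ rest (fun y hy => by
      by_contra hc; exact hr y hy (by simpa using hc))]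
    simp [hx]

-- append-in-loop is map
theorem pvFoldl_append_map {α : Type} (g : α → String) (xs : List α) (b : List String) :
    xs.foldl (fun acc p => acc ++ [g p]) b = b ++ xs.map g := by
  induction xs generalizing b with
  | nil => simp
  | cons x xs ih => simp [ih]

-- a filtered projection of the eligible list is the tagged version of A's comprehension
theorem pvFilterElig (coords : List (String × (List (String × String)) × Int)) (k : Int)
    (hk : k = 2 ∨ k = 3 ∨ k = 4) :
    (coords.filterMap (fun x => if x.2.2 == 2 || x.2.2 == 3 || x.2.2 == 4 then some (x.2.2, x.1, x.2.1) else none)).filter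
        (fun p => p.1 == k)
      = (coords.filterMap (fun x => if x.2.2 == k then some (x.1, x.2.1) else none)).map
        (fun p => (k, p.1, p.2)) := by
  induction coords with
  | nil => simp
  | cons x xs ih =>
    simp only [List.filterMap_cons]
    by_cases hx : x.2.2 = k
    · have he : (x.2.2 == 2 || x.2.2 == 3 || x.2.2 == 4) = true := by
        rcases hk with h | h | h <;> simp [hx, h]
      rw [if_pos he, if_pos (by simp [hx]), List.filter_cons,
        if_pos (show (((x.2.2, x.1, x.2.1).1 == k) = true) by simp [hx]), ih, List.map_cons, hx]
    · by_cases he : (x.2.2 == 2 || x.2.2 == 3 || x.2.2 == 4) = true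
      · rw [if_pos he, if_neg (by simp [hx]), List.filter_cons,
          if_neg (show ¬ (((x.2.2, x.1, x.2.1).1 == k) = true) by simp [hx]), ih]
      · rw [if_neg (by simpa using he), if_neg (by simp [hx]), ih]

-- section rendering of a tagged block (k = 4 and k = 3 with claim entries)
theorem pvSection4 (F : List (String × List (String × String))) :
    pvSectionB 4 (F.map (fun p => ((4 : Int), p.1, p.2)))
      = [pvHdr4 (PySem.List.len F)] ++ F.map (fun p => pvLiClaim p.1 p.2) ++ ["</ul>"] := by
  simp only [pvSectionB]
  rw [pvFoldl_append_map]
  simp [List.map_map, Function.comp_def, PySem.List.len]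

theorem pvSection3 (F : List (String × List (String × String))) :
    pvSectionB 3 (F.map (fun p => ((3 : Int), p.1, p.2)))
      = [pvHdr3 (PySem.List.len F)] ++ F.map (fun p => pvLiClaim p.1 p.2) ++ ["</ul>"] := by
  simp only [pvSectionB]
  rw [pvFoldl_append_map]
  simp [List.map_map, Function.comp_def, PySem.List.len]

theorem pvSection2 (F : List (String × List (String × String))) :
    pvSectionB 2 (F.map (fun p => ((2 : Int), p.1, p.2)))
      = [pvHdr2 (PySem.List.len F), pvHdr2b] ++ F.map (fun p => pvLiPlain p.1) ++ ["</ul>"] := by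
  simp only [pvSectionB]
  rw [pvFoldl_append_map]
  simp [List.map_map, Function.comp_def, PySem.List.len]

-- ===== VERDICT =====
theorem render_coord_index_spec : Claim_equal_render_coord_index := by
  intro coords _
  unfold Spec_render_coord_index render_coord_index render_coord_index_alt
  dsimp only
  set F := coords.filterMap (fun x => if x.2.2 == 4 then some (x.1, x.2.1) else none) with hF
  set T := coords.filterMap (fun x => if x.2.2 == 3 then some (x.1, x.2.1) else none) with hT
  set W := coords.filterMap (fun x => if x.2.2 == 2 then some (x.1, x.2.1) else none) with hW
  set E := coords.filterMap (fun x => if x.2.2 == 2 || x.2.2 == 3 || x.2.2 == 4 then some (x.2.2, x.1, x.2.1) else none) with hE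
  -- the sorted ranked list is the three tagged blocks
  have hElig : ∀ p ∈ E, p.1 = 2 ∨ p.1 = 3 ∨ p.1 = 4 := by
    intro p hp
    rw [hE] at hp
    obtain ⟨x, _, hx⟩ := List.mem_filterMap.mp hp
    by_cases hc : (x.2.2 == 2 || x.2.2 == 3 || x.2.2 == 4) = true
    · rw [if_pos hc] at hx
      cases hx
      have hc' := hc
      simp only [Bool.or_eq_true, beq_iff_eq] at hc'
      tauto
    · simp [hc] at hx
  have hsorted : PySem.List.sorted E (fun t => t.1) true
      = (F.map (fun p => ((4 : Int), p.1, p.2))) ++ ((T.map (fun p => ((3 : Int), p.1, p.2)))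
        ++ (W.map (fun p => ((2 : Int), p.1, p.2)))) := by
    rw [PySem.List.sorted_rev_eq_foldl_insertBy]
    have : (fun (acc : List (Int × String × List (String × String))) x =>
        PySem.List.insertBy (fun a b => decide (b.1 < a.1)) x acc)
        = (fun acc x => PySem.List.insertBy pvBefore x acc) := by
      funext acc x; rfl
    rw [this]
    have h0 := pvSortFold E [] [] [] (by simp) (by simp) (by simp) hElig
    simp only [List.nil_append] at h0
    rw [h0]
    rw [pvFilterElig coords 4 (by omega), pvFilterElig coords 3 (by omega),
        pvFilterElig coords 2 (by omega), ← hF, ← hT, ← hW, List.append_assoc]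
  rw [hsorted]
  -- scan the three blocks
  have h4 : ∀ p ∈ F.map (fun p => ((4 : Int), p.1, p.2)), (p : Int × String × List (String × String)).1 = 4 := by
    intro p hp; obtain ⟨q, _, hq⟩ := List.mem_map.mp hp; rw [← hq]
  have h3 : ∀ p ∈ T.map (fun p => ((3 : Int), p.1, p.2)), (p : Int × String × List (String × String)).1 = 3 := by
    intro p hp; obtain ⟨q, _, hq⟩ := List.mem_map.mp hp; rw [← hq]
  have h2 : ∀ p ∈ W.map (fun p => ((2 : Int), p.1, p.2)), (p : Int × String × List (String × String)).1 = 2 := by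
    intro p hp; obtain ⟨q, _, hq⟩ := List.mem_map.mp hp; rw [← hq]
  rw [pvScan_block 4 _ _ h4 (by
    intro p hp; rcases List.mem_append.mp hp with h | h
    · have := h3 p h; omega
    · have := h2 p h; omega)]
  rw [pvScan_block 3 _ _ h3 (by intro p hp; have := h2 p hp; omega)]
  rw [show (W.map (fun p => ((2 : Int), p.1, p.2)))
      = W.map (fun p => ((2 : Int), p.1, p.2)) ++ [] by simp,
    pvScan_block 2 _ _ h2 (by intro p hp; simp at hp)]
  -- both sides are now explicit section lists; split on emptiness of each group
  simp only [pvFoldl_append_map, pvSection4, pvSection3, pvSection2,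
    List.map_eq_nil_iff, pvScanB]
  rcases F with _ | ⟨f, Fs⟩ <;> rcases T with _ | ⟨t, Ts⟩ <;> rcases W with _ | ⟨w, Ws⟩ <;>
    simp [List.append_assoc, PySem.List.len]
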